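-- pv_equiv track=rewrite | github.com/B21DCCN712/Python_Ptit | kiemtra/on_tap_tren_lop/Day_so_doc_dac.py | is_dodac
-- ===== SOURCE A (Python) =====
-- def is_dodac(N, A):
--     # Tạo một từ điển để lưu trữ vị trí xuất hiện cuối cùng của mỗi phần tử trong dãy A
--     last_occurrence = {}
--     unique_count = 0  # Số lượng phần tử độc nhất trong dãy con hiện tại
--     result = "NO"
--
--     left = 0  # Vị trí bên trái của dãy con
--     for right in range(N):
--         if A[right] in last_occurrence and last_occurrence[A[right]] >= left:
--             # Nếu phần tử đã xuất hiện trước đó trong dãy con hiện tại, cập nhật left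
--             left = last_occurrence[A[right]] + 1
--
--         last_occurrence[A[right]] = right  # Cập nhật vị trí xuất hiện cuối cùng
--         unique_count = right - left + 1  # Số lượng phần tử độc nhất trong dãy con
--
--         if unique_count == right - left + 1 and unique_count >= 2:
--             result = "YES"
--
--     return result
-- ===== SOURCE B (Python) =====
-- def is_dodac(N, A):
--     # Simpler: within the first N elements, a distinct-elements window of
--     # length >= 2 exists iff they are not all equal, i.e. iff the set of the
--     # first N elements has more than one member.
--     seen = set()
--     for i in range(N):
--         seen.add(A[i])
--     return "YES" if len(seen) > 1 else "NO"
-- ===== Notes on version B (the rewrite author's own statement) =====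
-- stated objective: simpler
-- what changed: Replaces the sliding-window scan with dictionary of last occurrences and a left pointer by a single pass collecting the first N elements into a set and answering YES iff the set has more than one element (the window condition holds iff the first N elements are not all equal).
import Mathlib
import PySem

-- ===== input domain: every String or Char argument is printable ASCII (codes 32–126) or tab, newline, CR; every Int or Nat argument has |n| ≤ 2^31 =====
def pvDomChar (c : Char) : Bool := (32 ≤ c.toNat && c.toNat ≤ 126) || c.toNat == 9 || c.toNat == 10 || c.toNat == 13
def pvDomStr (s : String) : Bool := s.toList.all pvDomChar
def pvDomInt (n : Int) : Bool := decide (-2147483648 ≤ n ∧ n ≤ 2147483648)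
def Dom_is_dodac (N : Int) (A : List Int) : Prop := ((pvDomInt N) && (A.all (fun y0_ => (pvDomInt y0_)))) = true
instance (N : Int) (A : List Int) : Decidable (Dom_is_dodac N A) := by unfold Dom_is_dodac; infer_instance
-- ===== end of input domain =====

-- B is a simpler re-implementation: it collects the first N elements into a set and
-- answers "YES" iff the set has more than one element; proved equal to A's
-- sliding-window scan on all inputs where A does not raise (Pre_: N ≤ len(A)).

-- ===== PORT A =====
-- transliteration of A's for-loop; the `none` branch of pyGet? is Python's
-- IndexError (excluded by Pre_is_dodac)
def is_dodac_go (A : List Int) : List Int → PySem.Dict Int Int → Int → String → String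
  | [], _, _, result => result
  | r :: rs, lastOcc, left, result =>
    match PySem.List.pyGet? A r with
    | none => result
    | some x =>
      let left' := match lastOcc.get? x with
        | some p => if p ≥ left then p + 1 else left
        | none => left
      let lastOcc' := lastOcc.insert x r
      let uc := r - left' + 1
      let result' := if uc = r - left' + 1 ∧ uc ≥ 2 then "YES" else result
      is_dodac_go A rs lastOcc' left' result'

def is_dodac (N : Int) (A : List Int) : String :=
  is_dodac_go A (PySem.List.pyRange 0 N 1) PySem.Dict.empty 0 "NO"

-- ===== PORT B =====
def is_dodac_alt_go (A : List Int) : List Int → PySem.Set Int → PySem.Set Int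
  | [], seen => seen
  | i :: rs, seen =>
    match PySem.List.pyGet? A i with
    | none => seen
    | some x => is_dodac_alt_go A rs (PySem.Set.add seen x)

def is_dodac_alt (N : Int) (A : List Int) : String :=
  let seen := is_dodac_alt_go A (PySem.List.pyRange 0 N 1) PySem.Set.empty
  if seen.length > 1 then "YES" else "NO"

-- ===== PRECONDITION & SPEC =====
-- Pre_ excludes exactly N > len(A), where Python A raises IndexError.
def Pre_is_dodac (N : Int) (A : List Int) : Prop := N ≤ (A.length : Int)
instance (N : Int) (A : List Int) : Decidable (Pre_is_dodac N A) := by unfold Pre_is_dodac; infer_instance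
def pvWitness_is_dodac : Int × List Int := (3, [1, 1, 2])

def Spec_is_dodac (N : Int) (A : List Int) (out : String) : Prop := out = is_dodac_alt N A
instance (N : Int) (A : List Int) (out : String) : Decidable (Spec_is_dodac N A out) := by unfold Spec_is_dodac; infer_instance

-- ===== CLAIM (what is proved, stated in full; the proofs are below) =====
def Claim_equal_is_dodac : Prop := ∀ (N : Int) (A : List Int), Dom_is_dodac N A → Pre_is_dodac N A → Spec_is_dodac N A (is_dodac N A)

-- ===== LEMMAS AND PROOFS =====

-- once A's result is "YES" it stays "YES"
lemma goA_yes (A : List Int) : ∀ (rs : List Int) (d : PySem.Dict Int Int) (l : Int),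
    is_dodac_go A rs d l "YES" = "YES" := by
  intro rs
  induction rs with
  | nil => intro d l; rfl
  | cons r rs ih =>
    intro d l
    simp only [is_dodac_go]
    cases h : PySem.List.pyGet? A r with
    | none => rfl
    | some x =>
      simp only []
      split_ifs <;> exact ih _ _

-- adding to a set never shrinks it
lemma add_len_ge (s : PySem.Set Int) (x : Int) : s.length ≤ (PySem.Set.add s x).length := by
  rw [PySem.Set.add_eq_ite]
  split_ifs with h
  · exact le_refl _
  · simp

-- once B's set has ≥ 2 elements it keeps ≥ 2 elements
lemma goB_ge2 (A : List Int) : ∀ (rs : List Int) (s : PySem.Set Int),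
    2 ≤ s.length → 2 ≤ (is_dodac_alt_go A rs s).length := by
  intro rs
  induction rs with
  | nil => intro s h; exact h
  | cons i rs ih =>
    intro s h
    simp only [is_dodac_alt_go]
    cases hg : PySem.List.pyGet? A i with
    | none => exact h
    | some x => exact ih _ (le_trans h (add_len_ge s x))

-- main joint invariant: after an all-equal-to-c prefix of length m ≥ 1,
-- A's state is (a dict mapping exactly c ↦ m-1, left = m-1, "NO") and B's set is {c};
-- the two loops then agree on the remaining index range [m, N).
lemma go_joint (A : List Int) (N : Int) (hN : N ≤ (A.length : Int)) (c : Int) :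
    ∀ (k : Nat) (m : Int) (d : PySem.Dict Int Int) (l : Int), 1 ≤ m → m ≤ N →
    (N - m).toNat = k → l = m - 1 →
    (∀ y, d.get? y = if y = c then some l else none) →
    is_dodac_go A (PySem.List.pyRange m N 1) d l "NO"
      = (if 1 < (is_dodac_alt_go A (PySem.List.pyRange m N 1) [c]).length then "YES" else "NO") := by
  intro k
  induction k with
  | zero =>
    intro m d l h1 h2 h3 hl hd
    have hm : N = m := by omega
    rw [hm, PySem.List.pyRange_one_eq_nil (le_refl m)]
    simp [is_dodac_go, is_dodac_alt_go]
  | succ k ih =>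
    intro m d l h1 h2 h3 hl hd
    have hmN : m < N := by omega
    rw [PySem.List.pyRange_one_cons hmN]
    have hmlen : m.toNat < A.length := by omega
    have hget : PySem.List.pyGet? A m = some (A[m.toNat]) :=
      PySem.List.pyGet?_eq_some_getElem A (by omega) (by omega)
    by_cases hxc : A[m.toNat] = c
    · -- A[m] = c : both loops stay in the "all equal so far" phase
      rw [hxc] at hget
      have hdc : d.get? c = some l := by rw [hd c, if_pos rfl]
      simp only [is_dodac_go, is_dodac_alt_go, hget, hdc]
      rw [if_pos (le_refl l)]
      rw [if_neg (show ¬(True ∧ m - (l + 1) + 1 ≥ 2) from by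
        rintro ⟨-, h⟩; omega)]
      have hsadd : PySem.Set.add ([c] : PySem.Set Int) c = [c] :=
        PySem.Set.add_of_mem (by simp)
      rw [hsadd]
      exact ih (m + 1) (d.insert c m) (l + 1) (by omega) (by omega) (by omega) (by omega)
          (by
            intro y
            rw [PySem.Dict.get?_insert]
            by_cases hy : y = c
            · rw [if_pos hy, if_pos hy, show l + 1 = m by omega]
            · rw [if_neg hy, if_neg hy, hd y, if_neg hy])
    · -- A[m] ≠ c : A's window reaches length 2 ("YES" forever); B's set gets a 2nd element
      have hdx : d.get? (A[m.toNat]) = none := by rw [hd, if_neg hxc]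
      simp only [is_dodac_go, is_dodac_alt_go, hget, hdx]
      rw [if_pos (show True ∧ m - l + 1 ≥ 2 from ⟨trivial, by omega⟩)]
      rw [goA_yes]
      have hsadd : PySem.Set.add ([c] : PySem.Set Int) (A[m.toNat]) = [c] ++ [A[m.toNat]] :=
        PySem.Set.add_of_not_mem (by simp [hxc])
      rw [hsadd]
      have h2 : 2 ≤ (is_dodac_alt_go A (PySem.List.pyRange (m+1) N 1) ([c] ++ [A[m.toNat]])).length :=
        goB_ge2 A _ _ (by simp)
      rw [if_pos (by omega)]

-- ===== VERDICT (by name: the statement is the Claim_ definition above) =====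
theorem is_dodac_spec : Claim_equal_is_dodac := by
  intro N A _ hPre
  unfold Spec_is_dodac is_dodac is_dodac_alt
  by_cases hN : N ≤ 0
  · rw [PySem.List.pyRange_one_eq_nil hN]
    simp [is_dodac_go, is_dodac_alt_go, PySem.Set.empty]
  · push Not at hN
    rw [PySem.List.pyRange_one_cons hN]
    have h0len : 0 < A.length := by
      unfold Pre_is_dodac at hPre; omega
    have hget0 : PySem.List.pyGet? A 0 = some (A[0]) := by
      simpa using PySem.List.pyGet?_eq_some_getElem A (le_refl 0)
        (by unfold Pre_is_dodac at hPre; omega)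
    simp only [is_dodac_go, is_dodac_alt_go, hget0, PySem.Dict.get?_empty]
    rw [if_neg (show ¬(True ∧ (0:Int) - 0 + 1 ≥ 2) from by
      rintro ⟨-, h⟩; omega)]
    have hsadd : PySem.Set.add (PySem.Set.empty : PySem.Set Int) (A[0]) = [A[0]] :=
      PySem.Set.add_of_not_mem (List.not_mem_nil)
    rw [hsadd, show (0:Int) + 1 = 1 from by norm_num]
    exact go_joint A N hPre (A[0]) (N - 1).toNat 1 _ 0 (by omega) (by omega) (by omega)
      (by omega)
      (by
        intro y
        rw [PySem.Dict.get?_insert]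
        by_cases hy : y = A[0]
        · rw [if_pos hy, if_pos hy]
        · rw [if_neg hy, if_neg hy, PySem.Dict.get?_empty])
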